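-- pv_equiv track=rewrite | github.com/juliancaler0/MegaMod | scripts/reliquary_api_drift_pass2.py | process_imports
-- ===== SOURCE A (Python) =====
-- IMPORT_SUBS = {
--     # Wrong "fireball" subpackage from pass 1 -> the real "hurtingprojectile" one
--     "import net.minecraft.world.entity.projectile.fireball.LargeFireball;":
--         "import net.minecraft.world.entity.projectile.hurtingprojectile.LargeFireball;",
--     "import net.minecraft.world.entity.projectile.fireball.SmallFireball;":
--         "import net.minecraft.world.entity.projectile.hurtingprojectile.SmallFireball;",
--     # Other entity moves
--     "import net.minecraft.world.entity.projectile.ThrowableItemProjectile;":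
--         "import net.minecraft.world.entity.projectile.throwableitemprojectile.ThrowableItemProjectile;",
--     "import net.minecraft.world.entity.projectile.ThrownEnderpearl;":
--         "import net.minecraft.world.entity.projectile.throwableitemprojectile.ThrownEnderpearl;",
--     "import net.minecraft.world.entity.animal.Cow;":
--         "import net.minecraft.world.entity.animal.cow.Cow;",
--     "import net.minecraft.world.entity.npc.Villager;":
--         "import net.minecraft.world.entity.npc.villager.Villager;",
--     "import net.minecraft.world.entity.monster.Zombie;":
--         "import net.minecraft.world.entity.monster.zombie.Zombie;",
--     "import net.minecraft.world.entity.monster.ZombieVillager;":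
--         "import net.minecraft.world.entity.monster.zombie.ZombieVillager;",
-- }
--
-- def process_imports(src: str) -> str:
--     lines = src.split("\n")
--     out = []
--     for line in lines:
--         key = line.strip()
--         new = IMPORT_SUBS.get(key)
--         if new is not None:
--             leading = line[: len(line) - len(line.lstrip())]
--             out.append(leading + new if new else "")
--         else:
--             out.append(line)
--     return "\n".join(out)
-- ===== SOURCE B (Python) =====
-- IMPORT_SUBS = {
--     "import net.minecraft.world.entity.projectile.fireball.LargeFireball;":
--         "import net.minecraft.world.entity.projectile.hurtingprojectile.LargeFireball;",
--     "import net.minecraft.world.entity.projectile.fireball.SmallFireball;":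
--         "import net.minecraft.world.entity.projectile.hurtingprojectile.SmallFireball;",
--     "import net.minecraft.world.entity.projectile.ThrowableItemProjectile;":
--         "import net.minecraft.world.entity.projectile.throwableitemprojectile.ThrowableItemProjectile;",
--     "import net.minecraft.world.entity.projectile.ThrownEnderpearl;":
--         "import net.minecraft.world.entity.projectile.throwableitemprojectile.ThrownEnderpearl;",
--     "import net.minecraft.world.entity.animal.Cow;":
--         "import net.minecraft.world.entity.animal.cow.Cow;",
--     "import net.minecraft.world.entity.npc.Villager;":
--         "import net.minecraft.world.entity.npc.villager.Villager;",
--     "import net.minecraft.world.entity.monster.Zombie;":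
--         "import net.minecraft.world.entity.monster.zombie.Zombie;",
--     "import net.minecraft.world.entity.monster.ZombieVillager;":
--         "import net.minecraft.world.entity.monster.zombie.ZombieVillager;",
-- }
--
--
-- def process_imports(src: str) -> str:
--     # One character-level pass: a small state machine that tracks, for the
--     # current line, its leading whitespace, its stripped core and the pending
--     # trailing whitespace -- no split()/strip()/lstrip() calls at all.
--     out = []      # finished output pieces
--     indent = []   # leading whitespace of the current line
--     core = []     # current line stripped of surrounding whitespace
--     tail = []     # whitespace seen after core (pending: may become inner)
--     for ch in src:
--         if ch == "\n":
--             sub = IMPORT_SUBS.get("".join(core))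
--             if sub is not None:
--                 out.append("".join(indent) + sub)
--             else:
--                 out.append("".join(indent) + "".join(core) + "".join(tail))
--             out.append("\n")
--             indent, core, tail = [], [], []
--         elif ch.isspace():
--             if core:
--                 tail.append(ch)
--             else:
--                 indent.append(ch)
--         else:
--             core.extend(tail)
--             core.append(ch)
--             tail = []
--     sub = IMPORT_SUBS.get("".join(core))
--     if sub is not None:
--         out.append("".join(indent) + sub)
--     else:
--         out.append("".join(indent) + "".join(core) + "".join(tail))
--     return "".join(out)
-- ===== Notes on version B (the rewrite author's own statement) =====
-- stated objective: alternative
-- what changed: B replaces A's split-into-lines pass with a per-line strip()/lstrip() and dict lookup by a single character-level state machine over the whole string that incrementally maintains each line's leading whitespace, stripped core and trailing whitespace, flushing a line on every newline.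
import Mathlib
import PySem

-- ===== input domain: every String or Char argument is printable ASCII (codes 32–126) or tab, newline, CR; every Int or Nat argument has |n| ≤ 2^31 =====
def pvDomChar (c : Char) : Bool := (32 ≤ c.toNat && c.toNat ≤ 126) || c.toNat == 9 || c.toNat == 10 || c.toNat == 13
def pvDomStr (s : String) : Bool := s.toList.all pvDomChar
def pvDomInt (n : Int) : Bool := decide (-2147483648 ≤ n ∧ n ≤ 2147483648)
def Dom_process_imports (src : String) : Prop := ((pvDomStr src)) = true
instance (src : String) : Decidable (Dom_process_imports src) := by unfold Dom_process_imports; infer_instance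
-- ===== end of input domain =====

-- B replaces A's split-into-lines + strip/lstrip-per-line pass by a single character-level
-- state machine over the string (objective: alternative decomposition, same O(n) cost).

-- ===== PORT A =====
def IMPORT_SUBS : PySem.Dict String String := PySem.Dict.ofList
  [ ("import net.minecraft.world.entity.projectile.fireball.LargeFireball;",
     "import net.minecraft.world.entity.projectile.hurtingprojectile.LargeFireball;"),
    ("import net.minecraft.world.entity.projectile.fireball.SmallFireball;",
     "import net.minecraft.world.entity.projectile.hurtingprojectile.SmallFireball;"),
    ("import net.minecraft.world.entity.projectile.ThrowableItemProjectile;",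
     "import net.minecraft.world.entity.projectile.throwableitemprojectile.ThrowableItemProjectile;"),
    ("import net.minecraft.world.entity.projectile.ThrownEnderpearl;",
     "import net.minecraft.world.entity.projectile.throwableitemprojectile.ThrownEnderpearl;"),
    ("import net.minecraft.world.entity.animal.Cow;",
     "import net.minecraft.world.entity.animal.cow.Cow;"),
    ("import net.minecraft.world.entity.npc.Villager;",
     "import net.minecraft.world.entity.npc.villager.Villager;"),
    ("import net.minecraft.world.entity.monster.Zombie;",
     "import net.minecraft.world.entity.monster.zombie.Zombie;"),
    ("import net.minecraft.world.entity.monster.ZombieVillager;",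
     "import net.minecraft.world.entity.monster.zombie.ZombieVillager;") ]

-- A's loop body for one line: strip, dict lookup, re-attach leading whitespace on a hit
def pvFixLineA (line : List Char) : List Char :=
  let key := PySem.Chars.strip line
  match PySem.Dict.get? IMPORT_SUBS (String.ofList key) with
  | some new =>
      -- leading = line[: len(line) - len(line.lstrip())]; leading + new if new else ""
      if new ≠ "" then
        line.take (line.length - (PySem.Chars.lstrip line).length) ++ new.toList
      else []
  | none => line

def process_imports (src : String) : String :=
  String.ofList (PySem.Chars.join ['\n']
    ((PySem.Chars.splitOn src.toList ['\n']).map pvFixLineA))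

-- ===== PORT B =====
-- flush of the current line from the machine state (indent, core, tail)
def pvFlushB (indent core tail : List Char) : List Char :=
  match PySem.Dict.get? IMPORT_SUBS (String.ofList core) with
  | some sub => indent ++ sub.toList
  | none => indent ++ core ++ tail

-- one character of Source B's state machine; state = (out, indent, core, tail)
def pvStepB (st : List Char × List Char × List Char × List Char) (ch : Char) :
    List Char × List Char × List Char × List Char :=
  let (out, indent, core, tail) := st
  if ch = '\n' then (out ++ pvFlushB indent core tail ++ ['\n'], [], [], [])
  else if PySem.Chars.isspace ch then
    (if core ≠ [] then (out, indent, core, tail ++ [ch])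
     else (out, indent ++ [ch], core, tail))
  else (out, indent, core ++ tail ++ [ch], [])

def process_imports_alt (src : String) : String :=
  let fin := src.toList.foldl pvStepB ([], [], [], [])
  String.ofList (fin.1 ++ pvFlushB fin.2.1 fin.2.2.1 fin.2.2.2)

-- ===== PRECONDITION & SPEC =====
def Spec_process_imports (src : String) (out : String) : Prop := out = process_imports_alt src
instance (src : String) (out : String) : Decidable (Spec_process_imports src out) := by unfold Spec_process_imports; infer_instance

-- ===== CLAIM (what is proved, stated in full; the proofs are below) =====
def Claim_equal_process_imports : Prop := ∀ (src : String), Dom_process_imports src → Spec_process_imports src (process_imports src)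

-- ===== LEMMAS AND PROOFS =====

-- structural form of src.split("\n")
def splitNL : List Char → List (List Char)
  | [] => [[]]
  | c :: rest =>
      if c = '\n' then [] :: splitNL rest
      else
        match splitNL rest with
        | [] => [[c]]
        | h :: t => (c :: h) :: t

theorem splitNL_ne_nil (l : List Char) : splitNL l ≠ [] := by
  cases l with
  | nil => simp [splitNL]
  | cons c rest =>
      simp only [splitNL]
      split
      · simp
      · split <;> simp

theorem splitOn_go_spec (fuel : Nat) :
    ∀ (l cur : List Char) (accs : List (List Char)), l.length < fuel →
      ∃ h t, splitNL l = h :: t ∧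
        PySem.Chars.splitOn.go ['\n'] fuel l cur accs =
          accs.reverse ++ (cur.reverse ++ h) :: t := by
  induction fuel with
  | zero => intro l cur accs h; exact absurd h (Nat.not_lt_zero _)
  | succ fuel ih =>
      intro l cur accs hlen
      cases l with
      | nil =>
          refine ⟨[], [], rfl, ?_⟩
          rw [PySem.Chars.splitOn.go]
          · simp
          · omega
      | cons c rest =>
          rw [PySem.Chars.splitOn.go]
          by_cases hc : c = '\n'
          · subst hc
            have hpre : List.isPrefixOf ['\n'] ('\n' :: rest) = true := by
              simp [List.isPrefixOf]
            obtain ⟨h, t, h1, h2⟩ := ih rest [] (cur.reverse :: accs)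
              (by simpa using Nat.lt_of_succ_lt_succ hlen)
            refine ⟨[], h :: t, by simp [splitNL, h1], ?_⟩
            simp only [hpre, if_pos]
            simp [h2]
          · have hpre : List.isPrefixOf ['\n'] (c :: rest) = true → False := by
              simp [List.isPrefixOf]; intro h; exact hc h.symm
            obtain ⟨h, t, h1, h2⟩ := ih rest (c :: cur) accs
              (by simpa using Nat.lt_of_succ_lt_succ hlen)
            refine ⟨c :: h, t, by simp [splitNL, hc, h1], ?_⟩
            rw [if_neg (by intro hx; exact hpre hx)]
            rw [h2]; simp

theorem splitOn_nl (l : List Char) : PySem.Chars.splitOn l ['\n'] = splitNL l := by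
  obtain ⟨h, t, h1, h2⟩ := splitOn_go_spec (l.length + 1) l [] [] (Nat.lt_succ_self _)
  rw [PySem.Chars.splitOn, h2, h1]; simp

theorem splitNL_no_nl {l : List Char} (h : '\n' ∉ l) : splitNL l = [l] := by
  induction l with
  | nil => rfl
  | cons c rest ih =>
      simp only [List.mem_cons, not_or] at h
      have hc : c ≠ '\n' := fun e => h.1 e.symm
      simp [splitNL, hc, ih h.2]

theorem splitNL_append {a : List Char} (b : List Char) (h : '\n' ∉ a) :
    splitNL (a ++ '\n' :: b) = a :: splitNL b := by
  induction a with
  | nil => simp [splitNL]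
  | cons c rest ih =>
      simp only [List.mem_cons, not_or] at h
      have hc : c ≠ '\n' := fun e => h.1 e.symm
      simp [splitNL, hc, ih h.2]

-- the per-line part of the machine (what pvStepB does on a non-newline char)
def pvStepL (st : List Char × List Char × List Char) (ch : Char) :
    List Char × List Char × List Char :=
  let (indent, core, tail) := st
  if PySem.Chars.isspace ch then
    (if core ≠ [] then (indent, core, tail ++ [ch]) else (indent ++ [ch], core, tail))
  else (indent, core ++ tail ++ [ch], [])

theorem foldB_no_nl {l : List Char} (h : '\n' ∉ l) :
    ∀ (out : List Char) (st : List Char × List Char × List Char),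
      l.foldl pvStepB (out, st) = (out, l.foldl pvStepL st) := by
  induction l with
  | nil => intro out st; rfl
  | cons c rest ih =>
      intro out st
      simp only [List.mem_cons, not_or] at h
      have hc : c ≠ '\n' := fun e => h.1 e.symm
      obtain ⟨i, co, t⟩ := st
      simp only [List.foldl_cons]
      rw [show pvStepB (out, i, co, t) c = (out, pvStepL (i, co, t) c) by
        simp only [pvStepB, pvStepL, if_neg hc]
        split <;> first | rfl | (split <;> rfl)]
      exact ih h.2 out _

-- the trailing-whitespace run of the line (computed on the lstripped line)
def wsTail (a : List Char) : List Char :=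
  ((PySem.Chars.lstrip a).reverse.takeWhile PySem.Chars.isspace).reverse

theorem lstrip_eq_nil_of_strip : ∀ {a : List Char}, PySem.Chars.strip a = [] →
    PySem.Chars.lstrip a = [] := by
  intro a
  induction a with
  | nil => intro _; rfl
  | cons c rest ih =>
      intro h
      by_cases hc : PySem.Chars.isspace c = true
      · have he : PySem.Chars.lstrip (c :: rest) = PySem.Chars.lstrip rest := by
          simp [PySem.Chars.lstrip, List.dropWhile_cons_of_pos hc]
        rw [he]
        apply ih
        simpa [PySem.Chars.strip, he] using h
      · exfalso
        have hl : PySem.Chars.lstrip (c :: rest) = c :: rest := by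
          simp [PySem.Chars.lstrip, List.dropWhile_cons_of_neg (by simpa using hc)]
        simp only [PySem.Chars.strip, hl, PySem.Chars.rstrip] at h
        rw [List.reverse_eq_nil_iff, List.dropWhile_eq_nil_iff] at h
        exact hc (h c (by simp))

-- strip a ++ wsTail a reassembles the lstripped line
theorem strip_append_wsTail (a : List Char) :
    PySem.Chars.strip a ++ wsTail a = PySem.Chars.lstrip a := by
  simp only [PySem.Chars.strip, PySem.Chars.rstrip, wsTail]
  rw [← List.reverse_append, List.takeWhile_append_dropWhile, List.reverse_reverse]

theorem takeWhile_len_eq {p : Char → Bool} {a : List Char}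
    (h : (a.takeWhile p).length = a.length) : a.takeWhile p = a :=
  (List.takeWhile_prefix p).eq_of_length h

theorem dfa_spec (a : List Char) :
    a.foldl pvStepL ([], [], []) =
      (a.takeWhile PySem.Chars.isspace, PySem.Chars.strip a, wsTail a) := by
  induction a using List.reverseRecOn with
  | nil => rfl
  | append_singleton a ch ih =>
      rw [List.foldl_append, ih]
      simp only [List.foldl_cons, List.foldl_nil]
      by_cases hch : PySem.Chars.isspace ch = true
      · by_cases hC : PySem.Chars.strip a = []
        · have hL : PySem.Chars.lstrip a = [] := lstrip_eq_nil_of_strip hC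
          have hT : wsTail a = [] := by simp [wsTail, hL]
          have hAll : ∀ x ∈ a, PySem.Chars.isspace x = true := by
            simpa [PySem.Chars.lstrip, List.dropWhile_eq_nil_iff] using hL
          have hTk : a.takeWhile PySem.Chars.isspace = a :=
            List.takeWhile_eq_self_iff.2 hAll
          have hL' : PySem.Chars.lstrip (a ++ [ch]) = [] := by
            simp only [PySem.Chars.lstrip] at hL ⊢
            rw [List.dropWhile_append, hL]
            simp [hch]
          have hC' : PySem.Chars.strip (a ++ [ch]) = [] := by
            simp [PySem.Chars.strip, hL', PySem.Chars.rstrip]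
          have hT' : wsTail (a ++ [ch]) = [] := by simp [wsTail, hL']
          have htk' : (a ++ [ch]).takeWhile PySem.Chars.isspace = a ++ [ch] := by
            rw [List.takeWhile_append]
            simp [hTk, hch]
          simp [pvStepL, hch, hC, hT, hC', hT', htk']
          exact hAll
        · have hLne : PySem.Chars.lstrip a ≠ [] := by
            intro h0
            exact hC (by simp [PySem.Chars.strip, h0, PySem.Chars.rstrip])
          have hTkne : (a.takeWhile PySem.Chars.isspace).length ≠ a.length := by
            intro h0
            apply hLne
            have h3 := congrArg List.length
              (List.takeWhile_append_dropWhile (p := PySem.Chars.isspace) (l := a))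
            rw [List.length_append, h0] at h3
            have h2 : List.dropWhile PySem.Chars.isspace a = [] :=
              List.eq_nil_of_length_eq_zero (by omega)
            simp [PySem.Chars.lstrip, h2]
          have hls : PySem.Chars.lstrip (a ++ [ch]) = PySem.Chars.lstrip a ++ [ch] := by
            simp only [PySem.Chars.lstrip] at hLne ⊢
            rw [List.dropWhile_append]
            simp [List.isEmpty_iff, hLne]
          have hstrip : PySem.Chars.strip (a ++ [ch]) = PySem.Chars.strip a := by
            simp only [PySem.Chars.strip, PySem.Chars.rstrip, hls]
            rw [List.reverse_append]
            simp [List.dropWhile_cons_of_pos hch]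
          have hwt : wsTail (a ++ [ch]) = wsTail a ++ [ch] := by
            simp only [wsTail, hls]
            rw [List.reverse_append]
            simp [List.takeWhile_cons_of_pos hch]
          simp [pvStepL, hch, hC, hstrip, hwt, List.takeWhile_append, hTkne]
      · have hls : PySem.Chars.lstrip (a ++ [ch]) = PySem.Chars.lstrip a ++ [ch] := by
          simp only [PySem.Chars.lstrip]
          rw [List.dropWhile_append]
          by_cases h0 : List.dropWhile PySem.Chars.isspace a = []
          · simp [h0, List.dropWhile_cons_of_neg, hch]
          · simp [List.isEmpty_iff, h0]
        have hstrip : PySem.Chars.strip (a ++ [ch]) =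
            PySem.Chars.strip a ++ wsTail a ++ [ch] := by
          have h1 : PySem.Chars.strip (a ++ [ch]) = PySem.Chars.lstrip a ++ [ch] := by
            simp only [PySem.Chars.strip, PySem.Chars.rstrip, hls]
            rw [List.reverse_append]
            simp [List.dropWhile_cons_of_neg (by simpa using hch)]
          rw [h1, List.append_assoc, ← strip_append_wsTail a, List.append_assoc]
        have hwt : wsTail (a ++ [ch]) = [] := by
          simp [wsTail, hls, List.takeWhile_cons_of_neg (by simpa using hch)]
        have htk : (a ++ [ch]).takeWhile PySem.Chars.isspace =
            a.takeWhile PySem.Chars.isspace := by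
          rw [List.takeWhile_append]
          by_cases h0 : (a.takeWhile PySem.Chars.isspace).length = a.length
          · simp [List.takeWhile_cons_of_neg, hch, takeWhile_len_eq h0]
          · simp [h0]
        simp [pvStepL, hch, hstrip, hwt, htk]

theorem subs_val_ne (k v : String) (h : PySem.Dict.get? IMPORT_SUBS k = some v) :
    v ≠ "" := by
  have hm := PySem.Dict.mem_items_of_get?_eq_some IMPORT_SUBS h
  have hitems : IMPORT_SUBS.items =
    [ ("import net.minecraft.world.entity.projectile.fireball.LargeFireball;",
       "import net.minecraft.world.entity.projectile.hurtingprojectile.LargeFireball;"),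
      ("import net.minecraft.world.entity.projectile.fireball.SmallFireball;",
       "import net.minecraft.world.entity.projectile.hurtingprojectile.SmallFireball;"),
      ("import net.minecraft.world.entity.projectile.ThrowableItemProjectile;",
       "import net.minecraft.world.entity.projectile.throwableitemprojectile.ThrowableItemProjectile;"),
      ("import net.minecraft.world.entity.projectile.ThrownEnderpearl;",
       "import net.minecraft.world.entity.projectile.throwableitemprojectile.ThrownEnderpearl;"),
      ("import net.minecraft.world.entity.animal.Cow;",
       "import net.minecraft.world.entity.animal.cow.Cow;"),
      ("import net.minecraft.world.entity.npc.Villager;",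
       "import net.minecraft.world.entity.npc.villager.Villager;"),
      ("import net.minecraft.world.entity.monster.Zombie;",
       "import net.minecraft.world.entity.monster.zombie.Zombie;"),
      ("import net.minecraft.world.entity.monster.ZombieVillager;",
       "import net.minecraft.world.entity.monster.zombie.ZombieVillager;") ] := by decide
  rw [hitems] at hm
  simp only [List.mem_cons, List.not_mem_nil, or_false, Prod.mk.injEq] at hm
  rcases hm with ⟨_, hv⟩ | ⟨_, hv⟩ | ⟨_, hv⟩ | ⟨_, hv⟩ | ⟨_, hv⟩ | ⟨_, hv⟩ | ⟨_, hv⟩ | ⟨_, hv⟩ <;>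
    (rw [hv]; decide)

theorem line_eq (a : List Char) :
    pvFlushB (a.takeWhile PySem.Chars.isspace) (PySem.Chars.strip a) (wsTail a) =
      pvFixLineA a := by
  simp only [pvFlushB, pvFixLineA]
  cases hkv : PySem.Dict.get? IMPORT_SUBS (String.ofList (PySem.Chars.strip a)) with
  | none =>
      rw [List.append_assoc, strip_append_wsTail]
      simp [PySem.Chars.lstrip, List.takeWhile_append_dropWhile]
  | some v =>
      have hv : v ≠ "" := subs_val_ne _ _ hkv
      dsimp only
      rw [if_pos hv]
      have htake : a.take (a.length - (PySem.Chars.lstrip a).length) =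
          a.takeWhile PySem.Chars.isspace := by
        have hsplit := List.takeWhile_append_dropWhile
          (p := PySem.Chars.isspace) (l := a)
        have h3 := congrArg List.length hsplit
        rw [List.length_append] at h3
        have hlen : a.length - (PySem.Chars.lstrip a).length =
            (a.takeWhile PySem.Chars.isspace).length := by
          simp only [PySem.Chars.lstrip]
          omega
        rw [hlen]
        calc a.take (a.takeWhile PySem.Chars.isspace).length
            = (a.takeWhile PySem.Chars.isspace ++ a.dropWhile PySem.Chars.isspace).take
                (a.takeWhile PySem.Chars.isspace).length := by rw [hsplit]
          _ = a.takeWhile PySem.Chars.isspace := List.take_left' rfl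
      rw [htake]

theorem main_lemma (n : Nat) :
    ∀ (l : List Char), l.length ≤ n → ∀ (out : List Char),
      (l.foldl pvStepB (out, ([], [], []))).1 ++
          pvFlushB (l.foldl pvStepB (out, ([], [], []))).2.1
            (l.foldl pvStepB (out, ([], [], []))).2.2.1
            (l.foldl pvStepB (out, ([], [], []))).2.2.2 =
        out ++ PySem.Chars.join ['\n'] ((splitNL l).map pvFixLineA) := by
  induction n with
  | zero =>
      intro l hl out
      have : l = [] := List.eq_nil_of_length_eq_zero (Nat.le_zero.mp hl)
      subst this
      have h0 : IMPORT_SUBS.get? "" = none := by decide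
      simp [splitNL, PySem.Chars.join_singleton, pvFixLineA, pvFlushB,
        PySem.Chars.strip, PySem.Chars.lstrip, PySem.Chars.rstrip, h0]
  | succ n ih =>
      intro l hl out
      by_cases hnl : '\n' ∈ l
      · -- split off the first line
        set p : Char → Bool := fun c => !(c == '\n') with hp
        have hsplit : l.takeWhile p ++ l.dropWhile p = l := List.takeWhile_append_dropWhile
        have hdne : l.dropWhile p ≠ [] := by
          intro h0
          rw [List.dropWhile_eq_nil_iff] at h0
          have := h0 '\n' hnl
          simp [hp] at this
        obtain ⟨c, b, hcb⟩ := List.exists_cons_of_ne_nil hdne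
        have hc : c = '\n' := by
          have hnp := List.head_dropWhile_not p (l := l) hdne
          have hhead : (l.dropWhile p).head hdne = c := by simp [hcb]
          rw [hhead] at hnp
          simpa [hp] using hnp
        subst hc
        have hnnl : '\n' ∉ l.takeWhile p := by
          intro hmem
          have := List.mem_takeWhile_imp hmem
          simp [hp] at this
        have hl' : l = l.takeWhile p ++ '\n' :: b := by rw [← hcb, hsplit]
        have hblen : b.length ≤ n := by
          have := congrArg List.length hl'
          simp [List.length_append] at this
          omega
        rw [hl', List.foldl_append]
        rw [foldB_no_nl hnnl, dfa_spec]
        simp only [List.foldl_cons]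
        rw [show pvStepB (out, (l.takeWhile p).takeWhile PySem.Chars.isspace,
              PySem.Chars.strip (l.takeWhile p), wsTail (l.takeWhile p)) '\n' =
            (out ++ pvFixLineA (l.takeWhile p) ++ ['\n'], [], [], []) by
          simp [pvStepB, line_eq]]
        rw [ih b hblen (out ++ pvFixLineA (l.takeWhile p) ++ ['\n'])]
        rw [splitNL_append b hnnl]
        obtain ⟨h, t, hht⟩ : ∃ h t, splitNL b = h :: t := by
          cases hsb : splitNL b with
          | nil => exact absurd hsb (splitNL_ne_nil b)
          | cons h t => exact ⟨h, t, rfl⟩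
        rw [hht]
        simp only [List.map_cons, PySem.Chars.join_cons_cons]
        simp
      · rw [foldB_no_nl hnl, dfa_spec]
        simp only []
        rw [line_eq, splitNL_no_nl hnl]
        simp [PySem.Chars.join_singleton]

-- ===== VERDICT (by name: the statement is the Claim_ definition above) =====
theorem process_imports_spec : Claim_equal_process_imports := by
  intro src _
  unfold Spec_process_imports process_imports process_imports_alt
  rw [splitOn_nl]
  have := main_lemma src.toList.length src.toList le_rfl []
  simp only [List.nil_append] at this
  simp [this]
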